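-- pv_equiv track=rewrite | github.com/pemodest0/Quantum-systems | src/oqs_transport/network_families.py | _sierpinski_carpet_points
-- ===== SOURCE A (Python) =====
-- def _sierpinski_carpet_points(order: int) -> list[tuple[int, int]]:
--     points = [(0, 0)]
--     for _ in range(max(1, int(order))):
--         next_points: list[tuple[int, int]] = []
--         for x, y in points:
--             for dx in range(3):
--                 for dy in range(3):
--                     if dx == 1 and dy == 1:
--                         continue
--                     next_points.append((3 * x + dx, 3 * y + dy))
--         points = next_points
--     return sorted(set(points), key=lambda point: (point[0] + point[1], point[0], point[1]))
-- ===== SOURCE B (Python) =====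
-- def _sierpinski_carpet_points(order: int) -> list[tuple[int, int]]:
--     n = max(1, int(order))
--     size = 3 ** n
--     points = []
--     for x in range(size):
--         for y in range(size):
--             if all(not ((x // 3 ** k) % 3 == 1 and (y // 3 ** k) % 3 == 1) for k in range(n)):
--                 points.append((x, y))
--     return sorted(points, key=lambda point: (point[0] + point[1], point[0], point[1]))
-- ===== Notes on version B (the rewrite author's own statement) =====
-- stated objective: alternative
-- what changed: Replaces the iterated subdivision (repeatedly expanding each point into its eight sub-cells, then deduplicating with set()) by a direct base-three digit membership test: scan the full size-by-size grid once and keep a point iff no digit position has a middle digit in both coordinates, then sort with the same key.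
import Mathlib
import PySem

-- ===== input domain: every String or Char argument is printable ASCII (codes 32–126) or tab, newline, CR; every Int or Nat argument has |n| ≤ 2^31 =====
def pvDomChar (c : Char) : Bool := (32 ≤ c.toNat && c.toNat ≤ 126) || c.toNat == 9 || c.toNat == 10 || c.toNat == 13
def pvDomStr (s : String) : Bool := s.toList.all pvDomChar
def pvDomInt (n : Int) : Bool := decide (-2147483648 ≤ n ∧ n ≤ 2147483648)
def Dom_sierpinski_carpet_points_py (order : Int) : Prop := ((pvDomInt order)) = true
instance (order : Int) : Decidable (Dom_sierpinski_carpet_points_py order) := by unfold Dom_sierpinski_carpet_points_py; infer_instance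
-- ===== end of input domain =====

-- B replaces A's iterated eight-way subdivision + set() dedup by one scan of the
-- full grid with a base-three digit test, sorted with the same key;
-- an alternative algorithm, not claimed faster.

-- ===== PORT A =====
-- one subdivision step: for x, y in points: for dx in range(3): for dy in range(3): …
def pvStepA (pts : List (Int × Int)) : List (Int × Int) :=
  pts.foldl (fun next p =>
    (PySem.List.pyRange 0 3 1).foldl (fun next dx =>
      (PySem.List.pyRange 0 3 1).foldl (fun next dy =>
        if dx = 1 ∧ dy = 1 then next
        else next ++ [(3 * p.1 + dx, 3 * p.2 + dy)]) next) next) []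

def sierpinski_carpet_points_py (order : Int) : List (Int × Int) :=
  let points := (PySem.List.pyRange 0 (max 1 order) 1).foldl (fun pts _ => pvStepA pts) [(0, 0)]
  -- sorted(set(points), key=lambda point: (point[0]+point[1], point[0], point[1]));
  -- the tuple key is lexicographic and injective, so the set's iteration order is immaterial
  PySem.List.sorted (PySem.Set.ofList points)
    (fun p => toLex ((p.1 + p.2 : Int), toLex (p.1, p.2))) false

-- ===== PORT B =====
-- all(not ((x // 3**k) % 3 == 1 and (y // 3**k) % 3 == 1) for k in range(n))
def pvGoodB (n : Int) (x y : Int) : Bool :=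
  (PySem.List.pyRange 0 n 1).all (fun k =>
    !(decide (PySem.Int.mod (PySem.Int.floordiv x (3 ^ k.toNat)) 3 = 1) &&
      decide (PySem.Int.mod (PySem.Int.floordiv y (3 ^ k.toNat)) 3 = 1)))

def sierpinski_carpet_points_py_alt (order : Int) : List (Int × Int) :=
  let n := max 1 order
  let size : Int := 3 ^ n.toNat   -- 3 ** n, with n ≥ 1
  let points := (PySem.List.pyRange 0 size 1).foldl (fun acc x =>
    (PySem.List.pyRange 0 size 1).foldl (fun acc y =>
      if pvGoodB n x y then acc ++ [(x, y)] else acc) acc) []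
  PySem.List.sorted points
    (fun p => toLex ((p.1 + p.2 : Int), toLex (p.1, p.2))) false

-- ===== PRECONDITION & SPEC =====
def Spec_sierpinski_carpet_points_py (order : Int) (out : List (Int × Int)) : Prop := out = sierpinski_carpet_points_py_alt order
instance (order : Int) (out : List (Int × Int)) : Decidable (Spec_sierpinski_carpet_points_py order out) := by unfold Spec_sierpinski_carpet_points_py; infer_instance

-- ===== CLAIM (what is proved, stated in full; the proofs are below) =====
def Claim_equal_sierpinski_carpet_points_py : Prop := ∀ (order : Int), Dom_sierpinski_carpet_points_py order → Spec_sierpinski_carpet_points_py order (sierpinski_carpet_points_py order)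

-- ===== LEMMAS AND PROOFS =====

-- the eight children of a cell, in A's append order
def pvOffs (q : Int × Int) : List (Int × Int) :=
  [(3*q.1, 3*q.2), (3*q.1, 3*q.2+1), (3*q.1, 3*q.2+2),
   (3*q.1+1, 3*q.2), (3*q.1+1, 3*q.2+2),
   (3*q.1+2, 3*q.2), (3*q.1+2, 3*q.2+1), (3*q.1+2, 3*q.2+2)]

-- the mathematical carpet of depth n
def pvCarpet (n : Nat) (p : Int × Int) : Prop :=
  0 ≤ p.1 ∧ p.1 < 3 ^ n ∧ 0 ≤ p.2 ∧ p.2 < 3 ^ n ∧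
  ∀ k < n, ¬(p.1 / 3 ^ k % 3 = 1 ∧ p.2 / 3 ^ k % 3 = 1)

lemma pvStepA_eq (pts : List (Int × Int)) : pvStepA pts = pts.flatMap pvOffs := by
  have h3 : PySem.List.pyRange 0 3 1 = [0, 1, 2] := by decide
  have key : ∀ (l : List (Int × Int)) (acc : List (Int × Int)),
      l.foldl (fun next p =>
        (PySem.List.pyRange 0 3 1).foldl (fun next dx =>
          (PySem.List.pyRange 0 3 1).foldl (fun next dy =>
            if dx = 1 ∧ dy = 1 then next
            else next ++ [(3 * p.1 + dx, 3 * p.2 + dy)]) next) next) acc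
      = acc ++ l.flatMap pvOffs := by
    intro l
    induction l with
    | nil => intro acc; simp
    | cons p t ih =>
      intro acc
      rw [List.foldl_cons, ih]
      simp [h3, List.foldl, pvOffs]
  simpa using key pts []

lemma pvFoldl_const_iterate {α β : Type} (f : α → α) (l : List β) (i : α) :
    l.foldl (fun acc _ => f acc) i = f^[l.length] i := by
  induction l generalizing i with
  | nil => rfl
  | cons x t ih => simpa [Function.iterate_succ_apply] using ih (f i)

lemma pvMem_offs (p q : Int × Int) :
    p ∈ pvOffs q ↔ ∃ dx dy : Int, 0 ≤ dx ∧ dx < 3 ∧ 0 ≤ dy ∧ dy < 3 ∧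
      ¬(dx = 1 ∧ dy = 1) ∧ p = (3 * q.1 + dx, 3 * q.2 + dy) := by
  constructor
  · intro h
    simp [pvOffs] at h
    rcases h with h|h|h|h|h|h|h|h
    · exact ⟨0, 0, by norm_num, by simp [h]⟩
    · exact ⟨0, 1, by norm_num, by simp [h]⟩
    · exact ⟨0, 2, by norm_num, by simp [h]⟩
    · exact ⟨1, 0, by norm_num, by simp [h]⟩
    · exact ⟨1, 2, by norm_num, by simp [h]⟩
    · exact ⟨2, 0, by norm_num, by simp [h]⟩
    · exact ⟨2, 1, by norm_num, by simp [h]⟩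
    · exact ⟨2, 2, by norm_num, by simp [h]⟩
  · rintro ⟨dx, dy, h0, h1, h2, h3, h4, rfl⟩
    interval_cases dx <;> interval_cases dy <;> simp_all [pvOffs]

lemma pvDivPow (x : Int) (k : Nat) : x / 3 / 3^k = x / 3^(k+1) := by
  rw [Int.ediv_ediv_of_nonneg (by norm_num)]
  norm_num [pow_succ, mul_comm]

lemma pvIter_mem (m : Nat) (p : Int × Int) :
    p ∈ pvStepA^[m] [((0:Int), (0:Int))] ↔ pvCarpet m p := by
  induction m generalizing p with
  | zero =>
    simp only [Function.iterate_zero, id_eq, List.mem_singleton, pvCarpet]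
    constructor
    · rintro rfl; refine ⟨by norm_num, by norm_num, by norm_num, by norm_num, by simp⟩
    · rintro ⟨h1, h2, h3, h4, -⟩
      simp only [pow_zero] at h2 h4
      obtain ⟨x, y⟩ := p
      simp only [Prod.mk.injEq]
      omega
  | succ m ih =>
    rw [Function.iterate_succ_apply', pvStepA_eq, List.mem_flatMap]
    constructor
    · rintro ⟨q, hq, hp⟩
      rw [ih] at hq
      rw [pvMem_offs] at hp
      obtain ⟨dx, dy, hdx0, hdx3, hdy0, hdy3, hnot, rfl⟩ := hp
      obtain ⟨ha0, haA, hb0, hbA, hdig⟩ := hq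
      have hA : (3:Int) ^ (m+1) = 3 ^ m * 3 := by rw [pow_succ]
      refine ⟨by simp; omega, by simp; omega, by simp; omega, by simp; omega, ?_⟩
      intro k hk
      cases k with
      | zero =>
        simp only [pow_zero, Int.ediv_one]
        omega
      | succ j =>
        have hj : j < m := by omega
        have e1 : (3 * q.1 + dx) / 3 ^ (j+1) = q.1 / 3 ^ j := by
          rw [← pvDivPow]; congr 1; omega
        have e2 : (3 * q.2 + dy) / 3 ^ (j+1) = q.2 / 3 ^ j := by
          rw [← pvDivPow]; congr 1; omega
        simp only [e1, e2]
        exact hdig j hj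
    · rintro ⟨hx0, hxA, hy0, hyA, hdig⟩
      obtain ⟨x, y⟩ := p
      simp only at hx0 hxA hy0 hyA hdig
      refine ⟨(x / 3, y / 3), ?_, ?_⟩
      · rw [ih]
        have hA : (3:Int) ^ (m+1) = 3 ^ m * 3 := by rw [pow_succ]
        refine ⟨by simp; omega, by simp; omega, by simp; omega, by simp; omega, ?_⟩
        intro k hk
        simp only [pvDivPow]
        exact hdig (k+1) (by omega)
      · rw [pvMem_offs]
        refine ⟨x % 3, y % 3, by omega, by omega, by omega, by omega, ?_, ?_⟩
        · have := hdig 0 (by omega)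
          simp only [pow_zero, Int.ediv_one] at this
          omega
        · simp only [Prod.mk.injEq]; constructor <;> omega

lemma pvGoodB_iff (n x y : Int) :
    pvGoodB n x y = true ↔ ∀ k < n.toNat, ¬(x / 3^k % 3 = 1 ∧ y / 3^k % 3 = 1) := by
  rw [pvGoodB, List.all_eq_true]
  constructor
  · intro h k hk
    have hm := h (k : Int) (by rw [PySem.List.mem_pyRange_one]; omega)
    have e : ((k : Int)).toNat = k := by omega
    rw [e] at hm
    rw [PySem.Int.floordiv_eq_ediv_of_pos (by positivity),
        PySem.Int.floordiv_eq_ediv_of_pos (by positivity),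
        PySem.Int.mod_eq_emod_of_pos (by norm_num),
        PySem.Int.mod_eq_emod_of_pos (by norm_num)] at hm
    rw [not_and_or]; simpa using hm
  · intro h i hi
    rw [PySem.List.mem_pyRange_one] at hi
    have := h i.toNat (by omega)
    rw [PySem.Int.floordiv_eq_ediv_of_pos (by positivity),
        PySem.Int.floordiv_eq_ediv_of_pos (by positivity),
        PySem.Int.mod_eq_emod_of_pos (by norm_num),
        PySem.Int.mod_eq_emod_of_pos (by norm_num)]
    rw [not_and_or] at this; simpa using this

-- B's point list, before sorting, as a flatMap
def pvPtsB (n size : Int) : List (Int × Int) :=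
  (PySem.List.pyRange 0 size 1).flatMap (fun x =>
    ((PySem.List.pyRange 0 size 1).filter (fun y => pvGoodB n x y)).map (fun y => (x, y)))

lemma pvPtsB_eq (n size : Int) :
    (PySem.List.pyRange 0 size 1).foldl (fun acc x =>
      (PySem.List.pyRange 0 size 1).foldl (fun acc y =>
        if pvGoodB n x y then acc ++ [(x, y)] else acc) acc) []
    = pvPtsB n size := by
  have inner : ∀ (x : Int) (acc : List (Int × Int)),
      (PySem.List.pyRange 0 size 1).foldl (fun acc y =>
        if pvGoodB n x y then acc ++ [(x, y)] else acc) acc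
      = acc ++ ((PySem.List.pyRange 0 size 1).filter (fun y => pvGoodB n x y)).map (fun y => (x, y)) := by
    intro x acc
    exact PySem.List.foldl_append_if (fun y => pvGoodB n x y) (fun y => (x, y)) _ _
  have key : ∀ (l : List Int) (acc : List (Int × Int)),
      l.foldl (fun acc x =>
        (PySem.List.pyRange 0 size 1).foldl (fun acc y =>
          if pvGoodB n x y then acc ++ [(x, y)] else acc) acc) acc
      = acc ++ l.flatMap (fun x =>
          ((PySem.List.pyRange 0 size 1).filter (fun y => pvGoodB n x y)).map (fun y => (x, y))) := by
    intro l
    induction l with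
    | nil => intro acc; simp
    | cons x t ih =>
      intro acc
      rw [List.foldl_cons, ih, inner]
      simp
  simpa [pvPtsB] using key _ []

lemma pvMem_ptsB (n : Int) (p : Int × Int) :
    p ∈ pvPtsB n (3 ^ n.toNat) ↔ pvCarpet n.toNat p := by
  obtain ⟨x, y⟩ := p
  simp only [pvPtsB, List.mem_flatMap, List.mem_map, List.mem_filter,
    PySem.List.mem_pyRange_one, pvCarpet]
  constructor
  · rintro ⟨a, ⟨ha0, haS⟩, b, ⟨⟨hb0, hbS⟩, hg⟩, h⟩
    cases h
    exact ⟨ha0, haS, hb0, hbS, (pvGoodB_iff n _ _).mp hg⟩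
  · rintro ⟨hx0, hxS, hy0, hyS, hdig⟩
    exact ⟨x, ⟨hx0, hxS⟩, y, ⟨⟨hy0, hyS⟩, (pvGoodB_iff n x y).mpr hdig⟩, rfl⟩

lemma pvNodup_ptsB (n size : Int) : (pvPtsB n size).Nodup := by
  rw [pvPtsB, List.nodup_flatMap]
  constructor
  · intro x _
    exact ((PySem.List.nodup_pyRange_one 0 size).filter _).map
      (fun a b h => by simpa using (Prod.ext_iff.mp h).2)
  · have : (PySem.List.pyRange 0 size 1).Nodup := PySem.List.nodup_pyRange_one 0 size
    refine this.imp ?_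
    intro a b hab p hp hq
    simp only [List.mem_map, List.mem_filter] at hp hq
    obtain ⟨u, -, rfl⟩ := hp
    obtain ⟨v, -, hv⟩ := hq
    exact hab ((Prod.ext_iff.mp hv).1.symm)

lemma pvKey_inj : Function.Injective (fun p : Int × Int => toLex ((p.1 + p.2 : Int), toLex (p.1, p.2))) := by
  intro p q h
  simp only [toLex] at h
  obtain ⟨x, y⟩ := p; obtain ⟨a, b⟩ := q
  simp at h
  obtain ⟨-, h1, h2⟩ := h
  simp [h1, h2]

-- ===== VERDICT (by name: the statement is the Claim_ definition above) =====
theorem sierpinski_carpet_points_py_spec : Claim_equal_sierpinski_carpet_points_py := by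
  intro order _
  unfold Spec_sierpinski_carpet_points_py sierpinski_carpet_points_py sierpinski_carpet_points_py_alt
  simp only []
  rw [pvPtsB_eq]
  apply PySem.List.sorted_eq_sorted_of_perm _ _ _ pvKey_inj
  rw [List.perm_ext_iff_of_nodup (PySem.Set.nodup_ofList _) (pvNodup_ptsB _ _)]
  intro p
  rw [PySem.Set.mem_ofList, pvMem_ptsB,
      pvFoldl_const_iterate, PySem.List.length_pyRange_one]
  rw [pvIter_mem]
  have e : (max 1 order - 0).toNat = (max 1 order).toNat := by omega
  rw [e]
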